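-- pv_equiv track=rewrite | github.com/jamess005/SaaS-Stack-Manager | training/distill_traces.py | _pull_substance
-- ===== SOURCE A (Python) =====
-- def _pull_substance(info: dict) -> str:
--     if not info["pull_lines"]:
--         return "NONE"
--     if any("Substance: CONCRETE" in line for line in info["pull_lines"]):
--         return "CONCRETE"
--     if any("Substance: VAGUE" in line for line in info["pull_lines"]):
--         return "VAGUE"
--     return "UNKNOWN"
-- ===== SOURCE B (Python) =====
-- def _pull_substance(info: dict) -> str:
--     lines = info["pull_lines"]
--     if not lines:
--         return "NONE"
--     saw_vague = False
--     for line in lines: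
--         if "Substance: CONCRETE" in line:
--             return "CONCRETE"
--         if "Substance: VAGUE" in line:
--             saw_vague = True
--     return "VAGUE" if saw_vague else "UNKNOWN"
-- ===== Notes on version B (the rewrite author's own statement) =====
-- stated objective: simpler
-- what changed: Replaces the two separate any(...) scans over pull_lines with a single pass that returns CONCRETE immediately and remembers in a saw_vague flag whether VAGUE was seen.
import Mathlib
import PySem

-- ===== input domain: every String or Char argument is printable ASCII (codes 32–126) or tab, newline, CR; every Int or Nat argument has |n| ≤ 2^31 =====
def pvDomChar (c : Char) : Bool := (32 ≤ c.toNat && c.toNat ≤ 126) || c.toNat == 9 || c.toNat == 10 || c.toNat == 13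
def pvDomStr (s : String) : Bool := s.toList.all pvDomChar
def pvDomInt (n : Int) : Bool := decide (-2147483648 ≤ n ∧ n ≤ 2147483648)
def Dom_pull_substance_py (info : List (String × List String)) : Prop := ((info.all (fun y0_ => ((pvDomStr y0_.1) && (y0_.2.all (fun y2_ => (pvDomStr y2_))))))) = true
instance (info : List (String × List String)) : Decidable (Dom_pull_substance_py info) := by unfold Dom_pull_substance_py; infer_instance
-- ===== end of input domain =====

-- B replaces A's two separate any(...) scans with one pass maintaining a saw_vague flag (simpler, one traversal).

-- ===== PORT A =====
def pull_substance_py (info : List (String × List String)) : String :=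
  let lines := ((PySem.Dict.mk info).get? "pull_lines").getD []   -- Pre_ excludes the missing-key KeyError
  if lines.isEmpty then "NONE"
  else if lines.any (fun line => PySem.Str.isIn "Substance: CONCRETE" line) then "CONCRETE"
  else if lines.any (fun line => PySem.Str.isIn "Substance: VAGUE" line) then "VAGUE"
  else "UNKNOWN"

-- ===== PORT B =====
def pullSubstanceLoop (lines : List String) (sawVague : Bool) : String :=
  match lines with
  | [] => if sawVague then "VAGUE" else "UNKNOWN"
  | line :: rest =>
    if PySem.Str.isIn "Substance: CONCRETE" line then "CONCRETE"
    else pullSubstanceLoop rest (sawVague || PySem.Str.isIn "Substance: VAGUE" line)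

def pull_substance_py_alt (info : List (String × List String)) : String :=
  let lines := ((PySem.Dict.mk info).get? "pull_lines").getD []
  if lines.isEmpty then "NONE"
  else pullSubstanceLoop lines false

-- ===== PRECONDITION & SPEC =====
-- Pre_ excludes dicts without a "pull_lines" key, on which A raises KeyError.
def Pre_pull_substance_py (info : List (String × List String)) : Prop :=
  "pull_lines" ∈ info.map Prod.fst
instance (info : List (String × List String)) : Decidable (Pre_pull_substance_py info) := by
  unfold Pre_pull_substance_py; infer_instance
def pvWitness_pull_substance_py : (List (String × List String)) := [("pull_lines", ["Substance: VAGUE"])]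

def Spec_pull_substance_py (info : List (String × List String)) (out : String) : Prop := out = pull_substance_py_alt info
instance (info : List (String × List String)) (out : String) : Decidable (Spec_pull_substance_py info out) := by unfold Spec_pull_substance_py; infer_instance

-- ===== CLAIM (what is proved, stated in full; the proofs are below) =====
def Claim_equal_pull_substance_py : Prop := ∀ (info : List (String × List String)), Dom_pull_substance_py info → Pre_pull_substance_py info → Spec_pull_substance_py info (pull_substance_py info)

-- ===== LEMMAS AND PROOFS =====

-- B's loop computes A's two-scan value, for any incoming flag.
theorem pullSubstanceLoop_eq (lines : List String) (sawVague : Bool) :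
    pullSubstanceLoop lines sawVague =
      if lines.any (fun line => PySem.Str.isIn "Substance: CONCRETE" line) then "CONCRETE"
      else if sawVague || lines.any (fun line => PySem.Str.isIn "Substance: VAGUE" line) then "VAGUE"
      else "UNKNOWN" := by
  induction lines generalizing sawVague with
  | nil => simp [pullSubstanceLoop]
  | cons l rest ih =>
    simp only [pullSubstanceLoop, List.any_cons, ih]
    by_cases hc : PySem.Str.isIn "Substance: CONCRETE" l = true <;>
      by_cases hv : PySem.Str.isIn "Substance: VAGUE" l = true <;>
      simp only [hc, hv, Bool.false_or, Bool.or_false, Bool.true_or, Bool.or_true,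
        if_true, Bool.false_eq_true, if_false]

-- ===== VERDICT (by name: the statement is the Claim_ definition above) =====
theorem pull_substance_py_spec : Claim_equal_pull_substance_py := by
  intro info _ _
  unfold Spec_pull_substance_py pull_substance_py pull_substance_py_alt
  simp only [pullSubstanceLoop_eq, Bool.false_or]
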